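-- pv_equiv track=rewrite | github.com/Min-su-Jeong/Algorithm_Study | 프로그래머스/1/131128. 숫자 짝꿍/숫자 짝꿍.py | solution
-- ===== SOURCE A (Python) =====
-- def solution(X, Y):
--     answer = []
--
--     for i in (set(X) & set(Y)):
--         for j in range(min(X.count(i), Y.count(i))):
--             answer.append(i)
--
--     answer.sort(reverse=True)
--
--     if not len(answer):
--         return "-1"
--     elif answer[0] == "0":
--         return "0"
--
--     return ''.join(answer)
-- ===== SOURCE B (Python) =====
-- def solution(X, Y):
--     xs = sorted(X)
--     ys = sorted(Y)
--     i = j = 0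
--     res = []
--     while i < len(xs) and j < len(ys):
--         if xs[i] == ys[j]:
--             res.append(xs[i])
--             i += 1
--             j += 1
--         elif xs[i] < ys[j]:
--             i += 1
--         else:
--             j += 1
--     if not res:
--         return "-1"
--     res.reverse()
--     if res[0] == "0":
--         return "0"
--     return ''.join(res)
-- ===== Notes on version B (the rewrite author's own statement) =====
-- stated objective: alternative
-- what changed: Replaces A's iteration over the set intersection with per-character count() scans and a final descending sort by a sort-both-then-two-pointer linear merge that collects the common characters with multiplicity in ascending order and reverses once.
import Mathlib
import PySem

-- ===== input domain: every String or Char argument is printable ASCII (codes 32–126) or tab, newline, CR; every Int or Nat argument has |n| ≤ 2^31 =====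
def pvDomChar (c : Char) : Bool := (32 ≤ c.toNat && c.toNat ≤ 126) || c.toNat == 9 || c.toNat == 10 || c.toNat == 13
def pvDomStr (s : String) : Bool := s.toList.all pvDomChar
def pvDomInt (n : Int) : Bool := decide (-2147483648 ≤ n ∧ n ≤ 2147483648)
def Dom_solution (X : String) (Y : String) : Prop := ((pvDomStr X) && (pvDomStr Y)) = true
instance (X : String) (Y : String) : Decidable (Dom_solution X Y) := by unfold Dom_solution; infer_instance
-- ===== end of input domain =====

-- B replaces A's set-intersection + per-char count() + descending sort by sorting both strings
-- and collecting the common characters with a two-pointer merge (objective: alternative).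
-- ===== PORT A =====
-- for i in set(X) & set(Y): for j in range(min(X.count(i), Y.count(i))): answer.append(i); answer.sort(reverse=True)
-- (the Python iterates the set in hash order; the final sort makes the result independent of that order,
--  so the port iterates the intersection in PySem.Set order)
def answerA (xs ys : List Char) : List Char :=
  PySem.List.sorted
    ((PySem.Set.inter (PySem.Set.ofList xs) (PySem.Set.ofList ys)).foldl
      (fun acc i =>
        (PySem.List.pyRange 0 ((min (xs.count i) (ys.count i) : Nat) : Int) 1).foldl
          (fun a _ => a ++ [i]) acc)
      [])
    (fun c => c) true

def solution (X : String) (Y : String) : String :=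
  let answer := answerA X.toList Y.toList
  match answer with
  | [] => "-1"                                   -- if not len(answer): return "-1"
  | a0 :: _ => if a0 = '0' then "0"              -- elif answer[0] == "0": return "0"
               else String.ofList answer         -- return ''.join(answer)

-- ===== PORT B =====
-- the two-pointer while loop of Source B as structural recursion on the two sorted lists
def mergeCommon : List Char → List Char → List Char
  | [], _ => []
  | _ :: _, [] => []
  | x :: xs, y :: ys =>
    if x = y then x :: mergeCommon xs ys
    else if x < y then mergeCommon xs (y :: ys)
    else mergeCommon (x :: xs) ys

def solution_alt (X : String) (Y : String) : String :=
  let res := mergeCommon (PySem.List.sorted X.toList (fun c => c) false)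
                         (PySem.List.sorted Y.toList (fun c => c) false)
  match res with
  | [] => "-1"                                   -- if not res: return "-1"
  | _ :: _ =>
    let r := res.reverse                         -- res.reverse()
    if r.headD ' ' = '0' then "0"                -- if res[0] == "0":  (r nonempty here)
    else String.ofList r                         -- return ''.join(res)

-- ===== PRECONDITION & SPEC =====
def Spec_solution (X : String) (Y : String) (out : String) : Prop := out = solution_alt X Y
instance (X : String) (Y : String) (out : String) : Decidable (Spec_solution X Y out) := by unfold Spec_solution; infer_instance

-- ===== CLAIM (what is proved, stated in full; the proofs are below) =====
def Claim_equal_solution : Prop := ∀ (X : String) (Y : String), Dom_solution X Y → Spec_solution X Y (solution X Y)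

-- ===== LEMMAS AND PROOFS =====

-- a length-driven append loop is a replicate
lemma foldl_snoc_const {α β : Type} (l : List α) (c : β) (acc : List β) :
    l.foldl (fun a _ => a ++ [c]) acc = acc ++ List.replicate l.length c := by
  induction l generalizing acc with
  | nil => simp
  | cons x l ih => simp [ih, List.replicate_succ]

-- count of the replicate-appending loop over a duplicate-free list
lemma foldl_rep_count (f : Char → Nat) (l : List Char) (hnd : l.Nodup) (init : List Char) (d : Char) :
    (l.foldl (fun acc i => acc ++ List.replicate (f i) i) init).count d
      = init.count d + (if d ∈ l then f d else 0) := by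
  induction l generalizing init with
  | nil => simp
  | cons a l ih =>
    rcases List.nodup_cons.mp hnd with ⟨ha, hnd'⟩
    rw [List.foldl_cons, ih hnd']
    by_cases hd : d = a
    · subst hd
      simp [List.count_append, ha]
    · simp [List.count_append, List.count_replicate, hd, Ne.symm hd]

-- count of A's answer before sorting
lemma answerA_raw_count (xs ys : List Char) (c : Char) :
    ((PySem.Set.inter (PySem.Set.ofList xs) (PySem.Set.ofList ys)).foldl
      (fun acc i => acc ++ List.replicate (min (xs.count i) (ys.count i)) i) []).count c
      = min (xs.count c) (ys.count c) := by
  have hnd : (PySem.Set.inter (PySem.Set.ofList xs) (PySem.Set.ofList ys)).Nodup :=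
    PySem.Set.nodup_inter _ _ (PySem.Set.nodup_ofList xs)
  have h := foldl_rep_count (fun i => min (xs.count i) (ys.count i)) _ hnd [] c
  rw [h]
  by_cases hcm : c ∈ PySem.Set.inter (PySem.Set.ofList xs) (PySem.Set.ofList ys)
  · simp [hcm]
  · rw [if_neg hcm]
    rw [PySem.Set.mem_inter, PySem.Set.mem_ofList, PySem.Set.mem_ofList] at hcm
    by_cases hx : c ∈ xs
    · have h0 : ys.count c = 0 := List.count_eq_zero.mpr (fun hy => hcm ⟨hx, hy⟩)
      simp [h0]
    · have h0 : xs.count c = 0 := List.count_eq_zero.mpr hx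
      simp [h0]

lemma mergeCommon_mem (xs ys : List Char) (c : Char) (h : c ∈ mergeCommon xs ys) : c ∈ xs := by
  fun_induction mergeCommon xs ys with
  | case1 ys => simp at h
  | case2 x xs => simp at h
  | case3 xs x ys ih =>
    rcases List.mem_cons.mp h with h' | h'
    · simp [h']
    · exact List.mem_cons_of_mem _ (ih h')
  | case4 x xs y ys hne hlt ih => exact List.mem_cons_of_mem _ (ih h)
  | case5 x xs y ys hne hnlt ih => exact ih h

lemma mergeCommon_pairwise (xs ys : List Char) (hx : xs.Pairwise (· ≤ ·)) (hy : ys.Pairwise (· ≤ ·)) :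
    (mergeCommon xs ys).Pairwise (· ≤ ·) := by
  fun_induction mergeCommon xs ys with
  | case1 ys => simp
  | case2 x xs => simp
  | case3 xs x ys ih =>
    rcases List.pairwise_cons.mp hx with ⟨hx1, hx'⟩
    rcases List.pairwise_cons.mp hy with ⟨_, hy'⟩
    exact List.pairwise_cons.mpr
      ⟨fun z hz => hx1 z (mergeCommon_mem _ _ _ hz), ih hx' hy'⟩
  | case4 x xs y ys hne hlt ih => exact ih (List.pairwise_cons.mp hx).2 hy
  | case5 x xs y ys hne hnlt ih => exact ih hx (List.pairwise_cons.mp hy).2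

lemma mergeCommon_count (xs ys : List Char) (hx : xs.Pairwise (· ≤ ·)) (hy : ys.Pairwise (· ≤ ·)) (c : Char) :
    (mergeCommon xs ys).count c = min (xs.count c) (ys.count c) := by
  fun_induction mergeCommon xs ys with
  | case1 ys => simp
  | case2 x xs => simp
  | case3 xs x ys ih =>
    rcases List.pairwise_cons.mp hx with ⟨_, hx'⟩
    rcases List.pairwise_cons.mp hy with ⟨_, hy'⟩
    by_cases hc : c = x
    · subst hc
      rw [List.count_cons_self, List.count_cons_self, List.count_cons_self, ih hx' hy']
      omega
    · rw [List.count_cons_of_ne (Ne.symm hc), List.count_cons_of_ne (Ne.symm hc), List.count_cons_of_ne (Ne.symm hc), ih hx' hy']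
  | case4 x xs y ys hne hlt ih =>
    rw [ih (List.pairwise_cons.mp hx).2 hy]
    by_cases hc : c = x
    · subst hc
      have h0 : (y :: ys).count c = 0 := by
        apply List.count_eq_zero.mpr
        intro hm
        rcases List.mem_cons.mp hm with h' | h'
        · exact hne h'
        · exact absurd ((List.pairwise_cons.mp hy).1 c h') (not_le.mpr hlt)
      rw [h0]
      simp
    · rw [List.count_cons_of_ne (Ne.symm hc)]
  | case5 x xs y ys hne hnlt ih =>
    rw [ih hx (List.pairwise_cons.mp hy).2]
    by_cases hc : c = y
    · subst hc
      have hlt' : c < x := lt_of_le_of_ne (not_lt.mp hnlt) (fun h => hne h.symm)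
      have h0 : (x :: xs).count c = 0 := by
        apply List.count_eq_zero.mpr
        intro hm
        rcases List.mem_cons.mp hm with h' | h'
        · exact absurd h' (ne_of_lt hlt')
        · exact absurd ((List.pairwise_cons.mp hx).1 c h') (not_le.mpr hlt')
      rw [h0]
      simp
    · rw [List.count_cons_of_ne (Ne.symm hc)]

-- the heart of the equivalence: A's sorted answer is the reverse of B's merge
lemma answerA_eq (X Y : String) :
    answerA X.toList Y.toList
      = (mergeCommon (PySem.List.sorted X.toList (fun c => c) false)
                     (PySem.List.sorted Y.toList (fun c => c) false)).reverse := by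
  unfold answerA
  have hbody :
      ((PySem.Set.inter (PySem.Set.ofList X.toList) (PySem.Set.ofList Y.toList)).foldl
        (fun acc i =>
          (PySem.List.pyRange 0 ((min (X.toList.count i) (Y.toList.count i) : Nat) : Int) 1).foldl
            (fun a _ => a ++ [i]) acc) [])
      = ((PySem.Set.inter (PySem.Set.ofList X.toList) (PySem.Set.ofList Y.toList)).foldl
        (fun acc i => acc ++ List.replicate (min (X.toList.count i) (Y.toList.count i)) i) []) := by
    congr 1
    funext acc i
    rw [foldl_snoc_const, PySem.List.length_pyRange_one]
    simp
    omega
  rw [hbody]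
  have hrev :
      (PySem.List.sorted
        ((PySem.Set.inter (PySem.Set.ofList X.toList) (PySem.Set.ofList Y.toList)).foldl
          (fun acc i => acc ++ List.replicate (min (X.toList.count i) (Y.toList.count i)) i) [])
        (fun c => c) true).reverse
      = mergeCommon (PySem.List.sorted X.toList (fun c => c) false)
                    (PySem.List.sorted Y.toList (fun c => c) false) := by
    apply PySem.List.eq_of_perm_of_pairwise_le_of_injective (fun c : Char => c)
        (fun a b h => h)
    · rw [List.perm_iff_count]
      intro c
      rw [List.count_reverse, (PySem.List.sorted_perm _ _ _).count_eq, answerA_raw_count,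
        mergeCommon_count _ _ (PySem.List.sorted_pairwise _ _) (PySem.List.sorted_pairwise _ _),
        (PySem.List.sorted_perm X.toList (fun c => c) false).count_eq,
        (PySem.List.sorted_perm Y.toList (fun c => c) false).count_eq]
    · rw [List.pairwise_reverse]
      exact PySem.List.sorted_pairwise_rev _ _
    · exact mergeCommon_pairwise _ _ (PySem.List.sorted_pairwise _ _) (PySem.List.sorted_pairwise _ _)
  rw [← hrev, List.reverse_reverse]

-- ===== VERDICT (by name: the statement is the Claim_ definition above) =====
theorem solution_spec : Claim_equal_solution := by
  intro X Y _
  unfold Spec_solution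
  show solution X Y = solution_alt X Y
  unfold solution solution_alt
  rw [answerA_eq X Y]
  cases hM : mergeCommon (PySem.List.sorted X.toList (fun c => c) false)
                         (PySem.List.sorted Y.toList (fun c => c) false) with
  | nil => simp
  | cons m t =>
    have hne : (m :: t).reverse ≠ [] := by simp
    obtain ⟨a0, s, hs⟩ := List.exists_cons_of_ne_nil hne
    simp only [hs, List.headD_cons]
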